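-- pv_equiv track=rewrite | github.com/StanfordLegion/legion | compiler/lib/lcomp/region_analysis.py | summarize_modes_helper
-- ===== SOURCE A (Python) =====
-- def summarize_modes_helper(constraint_graph, region_usage, region, visited):
--     access_modes = region_usage
--
--     if region in visited:
--         return ({}, set())
--
--     modes = {}
--     regions = set()
--     if region in access_modes:
--         modes.update(access_modes[region])
--     regions.add(region)
--     if region in constraint_graph:
--         visited.add(region)
--         for next_region in constraint_graph[region]:
--             new_modes, new_regions = summarize_modes_helper(
--                 constraint_graph, region_usage, next_region, visited)
--             modes.update(new_modes)
--             regions.update(new_regions)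
--     return modes, regions
-- ===== SOURCE B (Python) =====
-- def summarize_modes_helper(constraint_graph, region_usage, region, visited):
--     # Iterative explicit-stack DFS instead of recursion: pre-order, last-wins
--     # dict merge; mutates `visited` the same way A does (in-graph nodes only).
--     modes = {}
--     regions = set()
--     stack = [region]
--     while stack:
--         r = stack.pop()
--         if r in visited:
--             continue
--         if r in region_usage:
--             modes.update(region_usage[r])
--         regions.add(r)
--         if r in constraint_graph:
--             visited.add(r)
--             stack.extend(reversed(constraint_graph[r]))
--     return modes, regions
-- ===== Notes on version B (the rewrite author's own statement) =====
-- stated objective: alternative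
-- what changed: The recursive DFS is replaced by an iterative explicit-stack DFS (one while-loop, children pushed reversed) that accumulates modes/regions in place instead of merging the results of recursive calls; return-value equivalence only (both mutate `visited` identically).
import Mathlib
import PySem

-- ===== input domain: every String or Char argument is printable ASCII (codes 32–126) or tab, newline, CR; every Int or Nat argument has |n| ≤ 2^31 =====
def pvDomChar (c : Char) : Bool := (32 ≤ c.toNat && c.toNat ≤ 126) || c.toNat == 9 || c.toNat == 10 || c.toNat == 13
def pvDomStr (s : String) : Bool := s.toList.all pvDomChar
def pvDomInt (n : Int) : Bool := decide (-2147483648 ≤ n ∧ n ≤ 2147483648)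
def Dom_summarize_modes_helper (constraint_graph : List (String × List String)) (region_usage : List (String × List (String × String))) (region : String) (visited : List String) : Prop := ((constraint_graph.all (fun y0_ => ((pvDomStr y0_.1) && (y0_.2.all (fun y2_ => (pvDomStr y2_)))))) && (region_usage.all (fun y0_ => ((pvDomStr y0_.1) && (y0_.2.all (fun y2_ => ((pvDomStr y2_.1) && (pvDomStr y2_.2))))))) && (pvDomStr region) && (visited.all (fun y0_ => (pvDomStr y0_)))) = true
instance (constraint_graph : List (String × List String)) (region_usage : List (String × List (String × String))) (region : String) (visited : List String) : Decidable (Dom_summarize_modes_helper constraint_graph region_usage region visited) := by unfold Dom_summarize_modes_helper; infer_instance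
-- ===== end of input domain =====

-- B replaces A's recursive DFS by an iterative explicit-stack DFS (alternative
-- decomposition, same cost); both A and B mutate the Python `visited` set the
-- same way, and the equivalence proved here is about the RETURN value.

-- ===== PORT A =====
-- A's recursion is guarded by a fuel counter (cg.length + 1 bounds the recursion
-- depth: every nested call first adds a distinct constraint_graph key to visited);
-- the fuel is a totality guard only, never reached on any input.
def summarize_modes_go (cg : List (String × List String)) (ru : List (String × List (String × String))) : Nat → String → List String → PySem.Dict String String × PySem.Set String × List String
  | 0, _, visited => (PySem.Dict.empty, PySem.Set.empty, visited)
  | fuel+1, region, visited =>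
    if region ∈ visited then (PySem.Dict.empty, PySem.Set.empty, visited)
    else
      -- modes = {}; if region in access_modes: modes.update(access_modes[region])
      let modes : PySem.Dict String String :=
        match (PySem.Dict.mk ru).get? region with
        | some am => PySem.Dict.update PySem.Dict.empty am
        | none => PySem.Dict.empty
      -- regions = set(); regions.add(region)
      let regions : PySem.Set String := PySem.Set.add PySem.Set.empty region
      match (PySem.Dict.mk cg).get? region with
      | none => (modes, regions, visited)
      | some children =>
        -- visited.add(region); for next_region in children: recurse and merge
        children.foldl
          (fun st c =>
            let t := summarize_modes_go cg ru fuel c st.2.2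
            (PySem.Dict.update st.1 t.1.items, PySem.Set.union st.2.1 t.2.1, t.2.2))
          (modes, regions, PySem.Set.add visited region)

def summarize_modes_helper (constraint_graph : List (String × List String)) (region_usage : List (String × List (String × String))) (region : String) (visited : List String) : (List (String × String)) × List String :=
  ((summarize_modes_go constraint_graph region_usage (constraint_graph.length + 1) region visited).1.items,
   (summarize_modes_go constraint_graph region_usage (constraint_graph.length + 1) region visited).2.1)

-- ===== PORT B =====
-- Termination measure for the stack loop: number of constraint_graph keys not yet visited.
def pvUnvis (cg : List (String × List String)) (v : List String) : Nat :=
  ((cg.map Prod.fst).filter (fun k => !(decide (k ∈ v)))).length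

lemma pvFiltMono (keys v v' : List String) (h : ∀ x ∈ v, x ∈ v') :
    (keys.filter (fun k => !(decide (k ∈ v')))).length ≤ (keys.filter (fun k => !(decide (k ∈ v)))).length := by
  induction keys with
  | nil => simp
  | cons a t ih =>
    by_cases ha' : a ∈ v'
    · by_cases ha : a ∈ v <;> simp [ha, ha'] <;> omega
    · have ha : a ∉ v := fun hm => ha' (h a hm)
      simp [ha, ha']
      omega

lemma pvUnvisLt (cg : List (String × List String)) (v : List String) (r : String)
    (hk : r ∈ cg.map Prod.fst) (hv : r ∉ v) :
    pvUnvis cg (v ++ [r]) < pvUnvis cg v := by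
  unfold pvUnvis
  generalize cg.map Prod.fst = keys at hk
  induction keys with
  | nil => cases hk
  | cons a t ih =>
    by_cases har : a = r
    · subst har
      have h1 : (!(decide (a ∈ v ++ [a]))) = false := by simp
      have h2 : (!(decide (a ∈ v))) = true := by simp [hv]
      rw [List.filter_cons, List.filter_cons, h1, h2]
      have h3 := pvFiltMono t v (v ++ [a]) (fun x hx => List.mem_append.mpr (Or.inl hx))
      simp only [Bool.false_eq_true, if_false, if_true, List.length_cons]
      omega
    · have hk' : r ∈ t := by
        rcases List.mem_cons.mp hk with h | h
        · exact absurd h.symm har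
        · exact h
      by_cases ha : a ∈ v
      · have h1 : (!(decide (a ∈ v ++ [r]))) = false := by
          simp [List.mem_append, ha]
        have h2 : (!(decide (a ∈ v))) = false := by simp [ha]
        rw [List.filter_cons, List.filter_cons, h1, h2]
        simp only [Bool.false_eq_true, if_false]
        exact ih hk'
      · have h1 : (!(decide (a ∈ v ++ [r]))) = true := by
          simp [List.mem_append, ha, har]
        have h2 : (!(decide (a ∈ v))) = true := by simp [ha]
        rw [List.filter_cons, List.filter_cons, h1, h2]
        simp only [if_true, List.length_cons]
        have := ih hk'
        omega

lemma pvGetSomeMemKeys (cg : List (String × List String)) (r : String) (children : List String)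
    (h : (PySem.Dict.mk cg).get? r = some children) : r ∈ cg.map Prod.fst := by
  by_contra hmem
  rw [(PySem.Dict.get?_eq_none_iff_not_mem_keys _ r).mpr (by simpa [PySem.Dict.keys] using hmem)] at h
  cases h

-- while stack: pop; skip if visited; merge usage; add region; push children
-- (Lean list head = Python stack top, so `reversed` + extend = children ++ rest).
def summarize_modes_alt_loop (cg : List (String × List String)) (ru : List (String × List (String × String))) (modes : PySem.Dict String String) (regions : PySem.Set String) (visited : List String) (stack : List String) : PySem.Dict String String × PySem.Set String × List String :=
  match stack with
  | [] => (modes, regions, visited)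
  | r :: rest =>
    if hv : r ∈ visited then summarize_modes_alt_loop cg ru modes regions visited rest
    else
      let modes' : PySem.Dict String String :=
        match (PySem.Dict.mk ru).get? r with
        | some am => PySem.Dict.update modes am
        | none => modes
      let regions' := PySem.Set.add regions r
      match hcg : (PySem.Dict.mk cg).get? r with
      | none => summarize_modes_alt_loop cg ru modes' regions' visited rest
      | some children => summarize_modes_alt_loop cg ru modes' regions' (PySem.Set.add visited r) (children ++ rest)
termination_by (pvUnvis cg visited, stack.length)
decreasing_by
  · exact Prod.Lex.right _ (Nat.lt_succ_self _)
  · exact Prod.Lex.right _ (Nat.lt_succ_self _)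
  · refine Prod.Lex.left _ _ ?_
    rw [PySem.Set.add_of_not_mem hv]
    exact pvUnvisLt cg visited r (pvGetSomeMemKeys cg r children hcg) hv

def summarize_modes_helper_alt (constraint_graph : List (String × List String)) (region_usage : List (String × List (String × String))) (region : String) (visited : List String) : (List (String × String)) × List String :=
  ((summarize_modes_alt_loop constraint_graph region_usage PySem.Dict.empty PySem.Set.empty visited [region]).1.items,
   (summarize_modes_alt_loop constraint_graph region_usage PySem.Dict.empty PySem.Set.empty visited [region]).2.1)

-- ===== PRECONDITION & SPEC =====
def Spec_summarize_modes_helper (constraint_graph : List (String × List String)) (region_usage : List (String × List (String × String))) (region : String) (visited : List String) (out : (List (String × String)) × List String) : Prop := out = summarize_modes_helper_alt constraint_graph region_usage region visited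
instance (constraint_graph : List (String × List String)) (region_usage : List (String × List (String × String))) (region : String) (visited : List String) (out : (List (String × String)) × List String) : Decidable (Spec_summarize_modes_helper constraint_graph region_usage region visited out) := by unfold Spec_summarize_modes_helper; infer_instance

-- ===== CLAIM (what is proved, stated in full; the proofs are below) =====
def Claim_equal_summarize_modes_helper : Prop := ∀ (constraint_graph : List (String × List String)) (region_usage : List (String × List (String × String))) (region : String) (visited : List String), Dom_summarize_modes_helper constraint_graph region_usage region visited → Spec_summarize_modes_helper constraint_graph region_usage region visited (summarize_modes_helper constraint_graph region_usage region visited)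

-- ===== LEMMAS AND PROOFS =====

lemma pvUnvisMono (cg : List (String × List String)) (v v' : List String) (h : ∀ x ∈ v, x ∈ v') :
    pvUnvis cg v' ≤ pvUnvis cg v := pvFiltMono _ v v' h

-- ---- dict update algebra ----
lemma pvDUpdCons (m : PySem.Dict String String) (p : String × String) (e : List (String × String)) :
    m.update (p :: e) = (m.insert p.1 p.2).update e := rfl

lemma pvDUpdAppend (m : PySem.Dict String String) (l1 l2 : List (String × String)) :
    m.update (l1 ++ l2) = (m.update l1).update l2 := by
  simp [PySem.Dict.update, List.foldl_append]

lemma pvDInsertComm (m : PySem.Dict String String) (k k2 : String) (v v2 : String)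
    (hk : k ∈ m.keys) (hne : k2 ≠ k) :
    (m.insert k v).insert k2 v2 = (m.insert k2 v2).insert k v := by
  have hck : m.contains k = true := (PySem.Dict.contains_iff_mem_keys m k).mpr hk
  have hkk2 : (k == k2) = false := beq_eq_false_iff_ne.mpr (Ne.symm hne)
  have hk2k : (k2 == k) = false := beq_eq_false_iff_ne.mpr hne
  by_cases hc2 : m.contains k2 = true
  · apply PySem.Dict.ext
    have e1 : (m.insert k v).contains k2 = true := by
      rw [PySem.Dict.contains_insert]; simp [hc2]
    have e2 : (m.insert k2 v2).contains k = true := by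
      rw [PySem.Dict.contains_insert]; simp [hck]
    rw [PySem.Dict.items_insert_of_contains _ v2 e1, PySem.Dict.items_insert_of_contains _ v hck,
        PySem.Dict.items_insert_of_contains _ v e2, PySem.Dict.items_insert_of_contains _ v2 hc2,
        List.map_map, List.map_map]
    apply List.map_congr_left
    intro p _
    by_cases hp1 : p.1 = k
    · simp [Function.comp, hp1, hkk2, hk2k]
    · by_cases hp2 : p.1 = k2
      · simp [Function.comp, hp1, hp2, hkk2, hk2k]
      · simp [Function.comp, hp1, hp2]
  · apply PySem.Dict.ext
    have hc2' : m.contains k2 = false := by simpa using hc2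
    have e1 : (m.insert k v).contains k2 = false := by
      rw [PySem.Dict.contains_insert]; simp [hc2', hk2k]
    have e2 : (m.insert k2 v2).contains k = true := by
      rw [PySem.Dict.contains_insert]; simp [hck]
    rw [PySem.Dict.items_insert_of_not_contains _ v2 e1,
        PySem.Dict.items_insert_of_contains _ v hck,
        PySem.Dict.items_insert_of_contains _ v e2,
        PySem.Dict.items_insert_of_not_contains _ v2 hc2',
        List.map_append]
    simp [hkk2]
    exact fun h => absurd h hne

lemma pvDInsertUpdate (l : List (String × String)) :
    ∀ (m : PySem.Dict String String) (k w : String), k ∈ m.keys → (∀ q ∈ l, q.1 ≠ k) →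
    (m.insert k w).update l = (m.update l).insert k w := by
  induction l with
  | nil => intro m k w _ _; rfl
  | cons p l' ih =>
    intro m k w hk hl
    rw [pvDUpdCons, pvDUpdCons,
        pvDInsertComm m k p.1 w p.2 hk (hl p (by simp))]
    exact ih (m.insert p.1 p.2) k w ((PySem.Dict.mem_keys_insert _ _ _ _).mpr (Or.inr hk))
      (fun q hq => hl q (by simp [hq]))

lemma pvDUpdItemsInsert (m d : PySem.Dict String String) (hd : d.keys.Nodup) (k w : String) :
    m.update (d.insert k w).items = (m.update d.items).insert k w := by
  by_cases hc : d.contains k = true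
  · have hk : k ∈ d.keys := (PySem.Dict.contains_iff_mem_keys d k).mp hc
    have hk' : k ∈ d.items.map (fun x => x.1) := hk
    obtain ⟨p, hp, hpk⟩ := List.mem_map.mp hk' 
    obtain ⟨pre, post, hsplit⟩ := List.append_of_mem hp
    obtain ⟨k1, v0⟩ := p
    simp only at hpk
    subst hpk
    have hkeys : ((pre.map (fun x => x.1)) ++ k1 :: (post.map (fun x => x.1))).Nodup := by
      have h := hd
      rw [PySem.Dict.keys, hsplit] at h
      simpa using h
    rw [List.nodup_append] at hkeys
    have hkpre : ∀ q ∈ pre, q.1 ≠ k1 := by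
      intro q hq hqk
      exact hkeys.2.2 k1 (List.mem_map.mpr ⟨q, hq, hqk⟩) k1 (by simp) rfl
    have hkpost : ∀ q ∈ post, q.1 ≠ k1 := by
      intro q hq hqk
      exact (List.nodup_cons.mp hkeys.2.1).1 (List.mem_map.mpr ⟨q, hq, hqk⟩)
    have hins : (d.insert k1 w).items = pre ++ (k1, w) :: post := by
      rw [PySem.Dict.items_insert_of_contains _ w hc, hsplit, List.map_append, List.map_cons]
      have h1 : List.map (fun p => if (p.1 == k1) = true then (k1, w) else p) pre = List.map id pre :=
        List.map_congr_left (fun q hq => by simp [beq_eq_false_iff_ne.mpr (hkpre q hq)])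
      have h2 : List.map (fun p => if (p.1 == k1) = true then (k1, w) else p) post = List.map id post :=
        List.map_congr_left (fun q hq => by simp [beq_eq_false_iff_ne.mpr (hkpost q hq)])
      rw [h1, h2]
      simp
    rw [hins, hsplit, pvDUpdAppend, pvDUpdAppend, pvDUpdCons, pvDUpdCons]
    rw [← PySem.Dict.insert_insert_self (m.update pre) k1 v0 w]
    exact pvDInsertUpdate post ((m.update pre).insert k1 v0) k1 w
      ((PySem.Dict.mem_keys_insert _ _ _ _).mpr (Or.inl rfl)) hkpost
  · have hc' : d.contains k = false := by simpa using hc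
    rw [PySem.Dict.items_insert_of_not_contains _ w hc', pvDUpdAppend]
    rfl

lemma pvDUpdAssoc (e : List (String × String)) :
    ∀ (m d : PySem.Dict String String), d.keys.Nodup →
    m.update (d.update e).items = (m.update d.items).update e := by
  induction e with
  | nil => intro m d _; rfl
  | cons p e' ih =>
    intro m d hd
    have h1 : d.update (p :: e') = (d.insert p.1 p.2).update e' := rfl
    rw [h1, ih m (d.insert p.1 p.2) (PySem.Dict.nodup_keys_insert d p.1 p.2 hd),
        pvDUpdItemsInsert m d hd p.1 p.2, pvDUpdCons]

lemma pvDEmptyUpdate (d : PySem.Dict String String) (hd : d.keys.Nodup) :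
    PySem.Dict.empty.update d.items = d := by
  apply PySem.Dict.ext
  have h : (PySem.Dict.empty.update d.items).items
      = PySem.Dict.empty.items ++ List.map (fun a => (a.1, a.2)) d.items :=
    PySem.Dict.items_foldl_insert_fresh d.items Prod.fst Prod.snd PySem.Dict.empty
      (fun a _ => PySem.Dict.contains_empty a.1) (by simpa [PySem.Dict.keys] using hd)
  simpa using h

-- ---- set union algebra ----
lemma pvSUnionCons (g : PySem.Set String) (x : String) (t : List String) :
    PySem.Set.union g (x :: t) = PySem.Set.union (PySem.Set.add g x) t := rfl

lemma pvSAddUnion (g G : PySem.Set String) (x : String) :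
    PySem.Set.add (PySem.Set.union g G) x = PySem.Set.union g (PySem.Set.add G x) := by
  by_cases hx : x ∈ G
  · rw [PySem.Set.add_of_mem hx, PySem.Set.add_of_mem ((PySem.Set.mem_union _ _ _).mpr (Or.inr hx))]
  · rw [PySem.Set.add_of_not_mem hx]
    simp [PySem.Set.union, PySem.Set.update, List.foldl_append, PySem.Set.add]

lemma pvSUnionAssoc (g1 : List String) :
    ∀ (g G : PySem.Set String),
    PySem.Set.union (PySem.Set.union g G) g1 = PySem.Set.union g (PySem.Set.union G g1) := by
  induction g1 with
  | nil => intro g G; rfl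
  | cons x t ih =>
    intro g G
    rw [pvSUnionCons, pvSUnionCons, pvSAddUnion, ih]

lemma pvSEmptyUnion (s : PySem.Set String) (h : s.Nodup) :
    PySem.Set.union PySem.Set.empty s = s := by
  show PySem.Set.update [] s = s
  rw [PySem.Set.update_nil_left, PySem.Set.ofList_eq_self_of_nodup s h]

-- ---- loop step equations ----
lemma pvLoopNil (cg : List (String × List String)) (ru : List (String × List (String × String)))
    (m : PySem.Dict String String) (g : PySem.Set String) (v : List String) :
    summarize_modes_alt_loop cg ru m g v [] = (m, g, v) := by
  rw [summarize_modes_alt_loop]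

lemma pvLoopVis (cg : List (String × List String)) (ru : List (String × List (String × String)))
    (m : PySem.Dict String String) (g : PySem.Set String) (v : List String) (r : String) (rest : List String)
    (hv : r ∈ v) :
    summarize_modes_alt_loop cg ru m g v (r :: rest) = summarize_modes_alt_loop cg ru m g v rest := by
  rw [summarize_modes_alt_loop]
  simp [hv]

lemma pvLoopStep (cg : List (String × List String)) (ru : List (String × List (String × String)))
    (m : PySem.Dict String String) (g : PySem.Set String) (v : List String) (r : String) (rest : List String)
    (hv : r ∉ v) :
    summarize_modes_alt_loop cg ru m g v (r :: rest) =
      (let m' := match (PySem.Dict.mk ru).get? r with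
        | some am => PySem.Dict.update m am
        | none => m
       match (PySem.Dict.mk cg).get? r with
       | none => summarize_modes_alt_loop cg ru m' (PySem.Set.add g r) v rest
       | some children => summarize_modes_alt_loop cg ru m' (PySem.Set.add g r) (PySem.Set.add v r) (children ++ rest)) := by
  rw [summarize_modes_alt_loop]
  rw [dif_neg hv]
  rcases h : (PySem.Dict.mk cg).get? r with _ | children <;> simp only [h]

-- ---- invariants of the A-side recursion ----
lemma pvFoldInv (cg : List (String × List String)) (ru : List (String × List (String × String))) (f : Nat)
    (ihf : ∀ (r : String) (v : List String),
      (summarize_modes_go cg ru f r v).1.keys.Nodup ∧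
      (summarize_modes_go cg ru f r v).2.1.Nodup ∧
      (∀ x ∈ v, x ∈ (summarize_modes_go cg ru f r v).2.2)) :
    ∀ (cs : List String) (st : PySem.Dict String String × PySem.Set String × List String),
      st.1.keys.Nodup → st.2.1.Nodup →
      ((cs.foldl (fun st c =>
          let t := summarize_modes_go cg ru f c st.2.2
          (PySem.Dict.update st.1 t.1.items, PySem.Set.union st.2.1 t.2.1, t.2.2)) st).1.keys.Nodup ∧
       (cs.foldl (fun st c =>
          let t := summarize_modes_go cg ru f c st.2.2
          (PySem.Dict.update st.1 t.1.items, PySem.Set.union st.2.1 t.2.1, t.2.2)) st).2.1.Nodup ∧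
       (∀ x ∈ st.2.2, x ∈ (cs.foldl (fun st c =>
          let t := summarize_modes_go cg ru f c st.2.2
          (PySem.Dict.update st.1 t.1.items, PySem.Set.union st.2.1 t.2.1, t.2.2)) st).2.2)) := by
  intro cs
  induction cs with
  | nil => intro st h1 h2; exact ⟨h1, h2, fun x hx => hx⟩
  | cons c cs' ih =>
    intro st h1 h2
    simp only [List.foldl_cons]
    obtain ⟨g1, g2, g3⟩ := ihf c st.2.2
    have hrec := ih (st.1.update (summarize_modes_go cg ru f c st.2.2).1.items,
                PySem.Set.union st.2.1 (summarize_modes_go cg ru f c st.2.2).2.1,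
                (summarize_modes_go cg ru f c st.2.2).2.2)
      (PySem.Dict.nodup_keys_update _ _ h1) (PySem.Set.nodup_union _ _ h2)
    exact ⟨hrec.1, hrec.2.1, fun x hx => hrec.2.2 x (g3 x hx)⟩

lemma pvGoInv (cg : List (String × List String)) (ru : List (String × List (String × String))) :
    ∀ (f : Nat) (r : String) (v : List String),
      (summarize_modes_go cg ru f r v).1.keys.Nodup ∧
      (summarize_modes_go cg ru f r v).2.1.Nodup ∧
      (∀ x ∈ v, x ∈ (summarize_modes_go cg ru f r v).2.2) := by
  intro f
  induction f with
  | zero =>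
    intro r v
    exact ⟨PySem.Dict.nodup_keys_empty, List.nodup_nil, fun x hx => hx⟩
  | succ f ih =>
    intro r v
    rw [summarize_modes_go]
    by_cases hv : r ∈ v
    · rw [if_pos hv]
      exact ⟨PySem.Dict.nodup_keys_empty, List.nodup_nil, fun x hx => hx⟩
    · rw [if_neg hv]
      have hM : ∀ am?, (match am? with
          | some am => PySem.Dict.update PySem.Dict.empty am
          | none => (PySem.Dict.empty : PySem.Dict String String)).keys.Nodup := by
        intro am?
        rcases am? with _ | am
        · exact PySem.Dict.nodup_keys_empty
        · exact PySem.Dict.nodup_keys_update _ _ PySem.Dict.nodup_keys_empty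
      rcases hcg : (PySem.Dict.mk cg).get? r with _ | children
      · simp only [hcg]
        exact ⟨hM _, PySem.Set.nodup_add _ _ List.nodup_nil, fun x hx => hx⟩
      · simp only [hcg]
        obtain ⟨a1, a2, a3⟩ := pvFoldInv cg ru f ih children
          (_, PySem.Set.add PySem.Set.empty r, PySem.Set.add v r)
          (hM ((PySem.Dict.mk ru).get? r)) (PySem.Set.nodup_add _ _ List.nodup_nil)
        exact ⟨a1, a2, fun x hx => a3 x ((PySem.Set.mem_add _ _ _).mpr (Or.inl hx))⟩

-- ---- simulation: the stack loop runs A's recursion ----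
lemma pvInner (cg : List (String × List String)) (ru : List (String × List (String × String))) (f : Nat)
    (IH : ∀ (r : String) (v : List String), pvUnvis cg v < f →
      ∀ (m : PySem.Dict String String) (g : PySem.Set String) (rest : List String),
      summarize_modes_alt_loop cg ru m g v (r :: rest) =
        summarize_modes_alt_loop cg ru
          (m.update (summarize_modes_go cg ru f r v).1.items)
          (PySem.Set.union g (summarize_modes_go cg ru f r v).2.1)
          (summarize_modes_go cg ru f r v).2.2 rest) :
    ∀ (cs : List String) (M : PySem.Dict String String) (G : PySem.Set String) (vv : List String),
      M.keys.Nodup → pvUnvis cg vv < f →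
      ∀ (m : PySem.Dict String String) (g : PySem.Set String) (rest : List String),
      summarize_modes_alt_loop cg ru (m.update M.items) (PySem.Set.union g G) vv (cs ++ rest) =
        (let t := cs.foldl
            (fun st c =>
              let u := summarize_modes_go cg ru f c st.2.2
              (PySem.Dict.update st.1 u.1.items, PySem.Set.union st.2.1 u.2.1, u.2.2)) (M, G, vv)
         summarize_modes_alt_loop cg ru (m.update t.1.items) (PySem.Set.union g t.2.1) t.2.2 rest) := by
  intro cs
  induction cs with
  | nil =>
    intro M G vv hM hfu m g rest
    simp only [List.nil_append, List.foldl_nil]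
  | cons c cs' ih =>
    intro M G vv hM hfu m g rest
    rw [List.cons_append, IH c vv hfu (m.update M.items) (PySem.Set.union g G) (cs' ++ rest)]
    rw [← pvDUpdAssoc (summarize_modes_go cg ru f c vv).1.items m M hM, pvSUnionAssoc]
    obtain ⟨hu1, hu2, hu3⟩ := pvGoInv cg ru f c vv
    have hrec := ih (M.update (summarize_modes_go cg ru f c vv).1.items)
      (PySem.Set.union G (summarize_modes_go cg ru f c vv).2.1)
      (summarize_modes_go cg ru f c vv).2.2
      (PySem.Dict.nodup_keys_update M _ hM)
      (Nat.lt_of_le_of_lt (pvUnvisMono cg vv _ hu3) hfu)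
      m g rest
    rw [hrec]
    simp only [List.foldl_cons]

lemma pvKey (cg : List (String × List String)) (ru : List (String × List (String × String))) :
    ∀ (f : Nat) (r : String) (v : List String), pvUnvis cg v < f →
      ∀ (m : PySem.Dict String String) (g : PySem.Set String) (rest : List String),
      summarize_modes_alt_loop cg ru m g v (r :: rest) =
        summarize_modes_alt_loop cg ru
          (m.update (summarize_modes_go cg ru f r v).1.items)
          (PySem.Set.union g (summarize_modes_go cg ru f r v).2.1)
          (summarize_modes_go cg ru f r v).2.2 rest := by
  intro f
  induction f with
  | zero => intro r v h; exact absurd h (Nat.not_lt_zero _)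
  | succ f ih =>
    intro r v hf m g rest
    by_cases hv : r ∈ v
    · rw [pvLoopVis cg ru m g v r rest hv]
      have hgo : summarize_modes_go cg ru (f+1) r v = (PySem.Dict.empty, PySem.Set.empty, v) := by
        rw [summarize_modes_go, if_pos hv]
      rw [hgo]
      rfl
    · rw [pvLoopStep cg ru m g v r rest hv]
      rw [summarize_modes_go, if_neg hv]
      rcases hcg : (PySem.Dict.mk cg).get? r with _ | children <;> simp only [hcg]
      · rcases hru : (PySem.Dict.mk ru).get? r with _ | am <;> simp only [hru]
        · rfl
        · rw [pvDUpdAssoc am m PySem.Dict.empty PySem.Dict.nodup_keys_empty]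
          rfl
      · have hlt : pvUnvis cg (v ++ [r]) < f := by
          have h1 := pvUnvisLt cg v r (pvGetSomeMemKeys cg r children hcg) hv
          omega
        rw [PySem.Set.add_of_not_mem hv]
        rcases hru : (PySem.Dict.mk ru).get? r with _ | am <;> simp only [hru]
        · exact pvInner cg ru f ih children PySem.Dict.empty (PySem.Set.add PySem.Set.empty r)
            (v ++ [r]) PySem.Dict.nodup_keys_empty hlt m g rest
        · have e1 : m.update ((PySem.Dict.empty.update am).items) = m.update am :=
            pvDUpdAssoc am m PySem.Dict.empty PySem.Dict.nodup_keys_empty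
          rw [← e1]
          exact pvInner cg ru f ih children (PySem.Dict.empty.update am) (PySem.Set.add PySem.Set.empty r)
            (v ++ [r]) (PySem.Dict.nodup_keys_update _ _ PySem.Dict.nodup_keys_empty) hlt m g rest

-- ===== VERDICT (by name: the statement is the Claim_ definition above) =====
theorem summarize_modes_helper_spec : Claim_equal_summarize_modes_helper := by
  intro cg ru region visited _
  unfold Spec_summarize_modes_helper summarize_modes_helper summarize_modes_helper_alt
  have hf : pvUnvis cg visited < cg.length + 1 := by
    have h := List.length_filter_le (fun k => !(decide (k ∈ visited))) (cg.map Prod.fst)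
    unfold pvUnvis
    simp only [List.length_map] at h
    omega
  rw [pvKey cg ru (cg.length + 1) region visited hf PySem.Dict.empty PySem.Set.empty [], pvLoopNil]
  obtain ⟨h1, h2, -⟩ := pvGoInv cg ru (cg.length + 1) region visited
  simp only [pvDEmptyUpdate _ h1, pvSEmptyUnion _ h2]
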